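-- pv_equiv track=rewrite | github.com/Pranaya14/DSA0301 | finate state automation.py | ends_with_ab
-- ===== SOURCE A (Python) =====
-- def ends_with_ab(input_string):
--     # Define the states
--     states = {
--         'q0': {'a': 'q1', 'b': 'q0'},
--         'q1': {'a': 'q1', 'b': 'q2'},
--         'q2': {'a': 'q1', 'b': 'q0'},
--     }
--
--     current_state = 'q0'
--
--     for char in input_string:
--         if char not in states[current_state]:
--             return False
--         current_state = states[current_state][char]
--
--     return current_state == 'q2'
-- ===== SOURCE B (Python) =====
-- def ends_with_ab(input_string):
--     return set(input_string) <= {'a', 'b'} and input_string.endswith('ab')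
-- ===== Notes on version B (the rewrite author's own statement) =====
-- stated objective: simpler
-- what changed: Replaces the explicit 3-state DFA transition table and state loop with a one-line validate-then-suffix check: every character must be in {'a','b'} and the string must end with 'ab'.
import Mathlib
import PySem

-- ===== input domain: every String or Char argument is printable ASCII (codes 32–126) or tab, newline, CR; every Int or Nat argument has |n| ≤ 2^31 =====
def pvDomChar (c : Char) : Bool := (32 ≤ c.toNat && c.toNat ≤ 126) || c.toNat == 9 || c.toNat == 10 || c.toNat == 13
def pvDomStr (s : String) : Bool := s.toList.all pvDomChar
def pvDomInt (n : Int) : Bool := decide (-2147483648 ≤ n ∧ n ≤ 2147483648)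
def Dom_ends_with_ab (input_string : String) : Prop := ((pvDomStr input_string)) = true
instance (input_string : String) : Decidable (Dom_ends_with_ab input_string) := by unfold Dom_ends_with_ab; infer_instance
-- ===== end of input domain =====

-- B replaces A's explicit DFA state table with an alphabet check plus an endswith("ab") suffix check (simpler, same O(n) cost).

-- ===== PORT A =====
-- the 'states' dict literal of A
def pvStatesA : PySem.Dict String (PySem.Dict Char String) :=
  PySem.Dict.ofList
    [("q0", PySem.Dict.ofList [('a', "q1"), ('b', "q0")]),
     ("q1", PySem.Dict.ofList [('a', "q1"), ('b', "q2")]),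
     ("q2", PySem.Dict.ofList [('a', "q1"), ('b', "q0")])]

-- the 'for char in input_string' loop with accumulator current_state
def pvLoopA (current_state : String) : List Char → Bool
  | [] => current_state == "q2"
  | char :: rest =>
    match PySem.Dict.get? pvStatesA current_state with
    | none => false        -- unreachable: current_state is always a key of pvStatesA (Python would raise KeyError)
    | some row =>
      match PySem.Dict.get? row char with
      | none => false      -- 'if char not in states[current_state]: return False'
      | some next => pvLoopA next rest

def ends_with_ab (input_string : String) : Bool :=
  pvLoopA "q0" input_string.toList

-- ===== PORT B =====
def ends_with_ab_alt (input_string : String) : Bool :=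
  PySem.Set.issubset (PySem.Set.ofList input_string.toList) ['a', 'b']
    && PySem.Str.endswith input_string "ab"

-- ===== PRECONDITION & SPEC =====
def Spec_ends_with_ab (input_string : String) (out : Bool) : Prop := out = ends_with_ab_alt input_string
instance (input_string : String) (out : Bool) : Decidable (Spec_ends_with_ab input_string out) := by unfold Spec_ends_with_ab; infer_instance

-- ===== CLAIM (what is proved, stated in full; the proofs are below) =====
def Claim_equal_ends_with_ab : Prop := ∀ (input_string : String), Dom_ends_with_ab input_string → Spec_ends_with_ab input_string (ends_with_ab input_string)

-- ===== LEMMAS AND PROOFS =====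

-- Boolean "ends with ['a','b']" by structural recursion, used as proof intermediary
def pvSfx : List Char → Bool
  | [] => false
  | [_] => false
  | [x, y] => x == 'a' && y == 'b'
  | _ :: y :: z :: r => pvSfx (y :: z :: r)

lemma pvSfx_eq_suffix (l : List Char) : pvSfx l = decide (['a', 'b'] <:+ l) := by
  induction l using pvSfx.induct with
  | case1 => simp [pvSfx, List.suffix_nil]
  | case2 x =>
      simp only [pvSfx, Bool.false_eq, decide_eq_false_iff_not]
      intro h
      have := h.length_le
      simp at this
  | case3 x y =>
      simp only [pvSfx]
      rw [Bool.eq_iff_iff]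
      simp only [Bool.and_eq_true, beq_iff_eq, decide_eq_true_eq]
      constructor
      · rintro ⟨rfl, rfl⟩; exact List.suffix_refl _
      · intro h
        have he : ['a', 'b'] = [x, y] := (List.suffix_iff_eq_drop.mp h).trans (by simp)
        simp only [List.cons.injEq] at he
        exact ⟨he.1.symm, he.2.1.symm⟩
  | case4 x y z r ih =>
      simp only [pvSfx, ih]
      rw [Bool.eq_iff_iff]
      simp only [decide_eq_true_eq]
      constructor
      · intro h; exact h.trans (List.suffix_cons _ _)
      · intro h
        rcases List.suffix_cons_iff.mp h with h | h
        · exact absurd (congrArg List.length h) (by simp)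
        · exact h

-- the 3-way loop invariant: one conjunct per reachable state
lemma pvLoopA_eq (l : List Char) :
    pvLoopA "q0" l = (l.all (fun c => c == 'a' || c == 'b') && pvSfx l)
    ∧ pvLoopA "q1" l = (l.all (fun c => c == 'a' || c == 'b') && pvSfx ('a' :: l))
    ∧ pvLoopA "q2" l = (l.all (fun c => c == 'a' || c == 'b') && pvSfx ('a' :: 'b' :: l)) := by
  induction l with
  | nil => refine ⟨by decide, by decide, by decide⟩
  | cons c l ih =>
      obtain ⟨ih0, ih1, ih2⟩ := ih
      by_cases ha : c = 'a'
      · subst ha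
        refine ⟨?_, ?_, ?_⟩ <;>
          · show pvLoopA "q1" l = _
            rw [ih1]
            match l with
            | [] => decide
            | [y] => simp [pvSfx]
            | y :: z :: r => simp [pvSfx]
      · by_cases hb : c = 'b'
        · subst hb
          refine ⟨?_, ?_, ?_⟩
          · show pvLoopA "q0" l = _
            rw [ih0]
            match l with
            | [] => decide
            | [y] => simp [pvSfx]
            | y :: z :: r => simp [pvSfx]
          · show pvLoopA "q2" l = _
            rw [ih2]
            match l with
            | [] => decide
            | [y] => simp [pvSfx]
            | y :: z :: r => simp [pvSfx]
          · show pvLoopA "q0" l = _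
            rw [ih0]
            match l with
            | [] => decide
            | [y] => simp [pvSfx]
            | y :: z :: r => simp [pvSfx]
        · have ha' : ('a' == c) = false := by simpa using fun h => ha h.symm
          have hb' : ('b' == c) = false := by simpa using fun h => hb h.symm
          have hd : ∀ (s1 s2 : String),
              PySem.Dict.ofList [('a', s1), ('b', s2)] = PySem.Dict.mk [('a', s1), ('b', s2)] :=
            fun _ _ => rfl
          refine ⟨?_, ?_, ?_⟩ <;>
            · show (match PySem.Dict.get? _ c with
                    | none => false
                    | some next => pvLoopA next l) = _
              simp [hd, ha', hb', PySem.Dict.get?]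
              intro h _
              exact absurd h (by tauto)

lemma pvSubset_eq_all (l : List Char) :
    PySem.Set.issubset (PySem.Set.ofList l) ['a', 'b']
      = l.all (fun c => c == 'a' || c == 'b') := by
  rw [Bool.eq_iff_iff, PySem.Set.issubset_iff, List.all_eq_true]
  constructor
  · intro h c hc
    have := h c (by rw [PySem.Set.mem_ofList]; exact hc)
    simpa using this
  · intro h c hc
    rw [PySem.Set.mem_ofList] at hc
    have := h c hc
    simpa using this

-- ===== VERDICT (by name: the statement is the Claim_ definition above) =====
theorem ends_with_ab_spec : Claim_equal_ends_with_ab := by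
  intro s _
  show ends_with_ab s = ends_with_ab_alt s
  unfold ends_with_ab ends_with_ab_alt
  rw [(pvLoopA_eq s.toList).1, pvSubset_eq_all, pvSfx_eq_suffix]
  have habl : ("ab" : String).toList = ['a', 'b'] := by decide
  have : PySem.Str.endswith s "ab" = decide (['a', 'b'] <:+ s.toList) := by
    rw [Bool.eq_iff_iff, decide_eq_true_iff, PySem.Str.endswith_eq, habl]
    exact PySem.Chars.endswith_iff s.toList ['a', 'b']
  rw [this]
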